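-- pv_equiv track=rewrite | github.com/darrenjss/coding_test | CodingTest.py | add_subtract_numbers
-- ===== SOURCE A (Python) =====
-- def add_subtract_numbers(number_string):
--     numbers = number_string.split()
--
--     numbers = [int(num) for num in numbers]
--
--     result = numbers[0]
--
--     for i in range(1, len(numbers)):
--         if i % 2 == 1:
--             result = result + numbers[i]
--         else:
--             result = result - numbers[i]
--
--     return result
-- ===== SOURCE B (Python) =====
-- def add_subtract_numbers(number_string):
--     nums = [int(tok) for tok in number_string.split()]
--     return nums[0] + sum(nums[1::2]) - sum(nums[2::2])
-- ===== Notes on version B (the rewrite author's own statement) =====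
-- stated objective: simpler
-- what changed: Replaces the indexed loop with its parity branch by parity-strided slices: the result is nums[0] plus the sum of the odd-indexed elements minus the sum of the even-indexed elements from index 2.
import Mathlib
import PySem

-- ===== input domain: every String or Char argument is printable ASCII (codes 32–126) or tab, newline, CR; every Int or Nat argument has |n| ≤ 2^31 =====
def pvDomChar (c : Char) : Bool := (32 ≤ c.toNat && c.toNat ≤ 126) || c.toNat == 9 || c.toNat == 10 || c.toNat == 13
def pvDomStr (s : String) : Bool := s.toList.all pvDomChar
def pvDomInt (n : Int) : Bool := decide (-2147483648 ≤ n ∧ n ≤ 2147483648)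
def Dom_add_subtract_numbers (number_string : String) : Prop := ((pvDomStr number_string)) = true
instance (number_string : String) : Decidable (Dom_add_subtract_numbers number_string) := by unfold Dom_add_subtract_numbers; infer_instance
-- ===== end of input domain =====

-- B computes the alternating sum by parity-strided slices (nums[0] + sum(nums[1::2]) - sum(nums[2::2]))
-- instead of A's indexed loop with a parity branch; same cost, simpler.

-- ===== PORT A =====
def add_subtract_numbers (number_string : String) : Int :=
  let numbers := (PySem.Str.split₀ number_string).map (fun num => (PySem.Int.ofStr? num).getD 0)
  let result := PySem.List.pyGetD numbers 0 0
  (PySem.List.pyRange 1 (numbers.length : Int) 1).foldl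
    (fun result i =>
      if PySem.Int.mod i 2 = 1 then result + PySem.List.pyGetD numbers i 0
      else result - PySem.List.pyGetD numbers i 0) result

-- ===== PORT B =====
def add_subtract_numbers_alt (number_string : String) : Int :=
  let nums := (PySem.Str.split₀ number_string).map (fun tok => (PySem.Int.ofStr? tok).getD 0)
  PySem.List.pyGetD nums 0 0
    + ((PySem.List.slice? nums (some 1) none 2).getD []).sum
    - ((PySem.List.slice? nums (some 2) none 2).getD []).sum

-- ===== PRECONDITION & SPEC =====
-- Pre_ excludes exactly the inputs where Python A raises: an empty/whitespace string (IndexError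
-- on numbers[0]) and strings containing a token that int() rejects (ValueError). B raises there too.
def Pre_add_subtract_numbers (number_string : String) : Prop :=
  PySem.Str.split₀ number_string ≠ [] ∧
  (PySem.Str.split₀ number_string).all (fun t => (PySem.Int.ofStr? t).isSome) = true
instance (number_string : String) : Decidable (Pre_add_subtract_numbers number_string) := by
  unfold Pre_add_subtract_numbers; infer_instance
def pvWitness_add_subtract_numbers : String := "1 2 3"

def Spec_add_subtract_numbers (number_string : String) (out : Int) : Prop := out = add_subtract_numbers_alt number_string
instance (number_string : String) (out : Int) : Decidable (Spec_add_subtract_numbers number_string out) := by unfold Spec_add_subtract_numbers; infer_instance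

-- ===== CLAIM (what is proved, stated in full; the proofs are below) =====
def Claim_equal_add_subtract_numbers : Prop := ∀ (number_string : String), Dom_add_subtract_numbers number_string → Pre_add_subtract_numbers number_string → Spec_add_subtract_numbers number_string (add_subtract_numbers number_string)

-- ===== LEMMAS AND PROOFS =====

-- every-other element of a list (what a [::2] stride selects)
def pvEO : List Int → List Int
  | [] => []
  | [x] => [x]
  | x :: _ :: rest => x :: pvEO rest

-- A's loop body, signed by the index's parity, as structural recursion on the remaining list
def pvAltK : Nat → List Int → Int
  | _, [] => 0
  | k, x :: xs => (if k % 2 = 1 then x else -x) + pvAltK (k + 1) xs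

lemma pvEO_cons (y : Int) (rest : List Int) : pvEO (y :: rest) = y :: pvEO rest.tail := by
  cases rest <;> simp [pvEO]

lemma pvAltK_eo : ∀ (xs : List Int) (k : Nat), k % 2 = 1 →
    pvAltK k xs = (pvEO xs).sum - (pvEO xs.tail).sum
  | [], _, _ => by simp [pvAltK, pvEO]
  | [x], k, h => by simp [pvAltK, pvEO, h]
  | x :: y :: rest, k, h => by
    have h1 : ¬ ((k + 1) % 2 = 1) := by omega
    have h2 : (k + 2) % 2 = 1 := by omega
    have ih := pvAltK_eo rest (k + 2) h2
    simp [pvAltK, pvEO, h, h1, ih, pvEO_cons]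
    ring

lemma pvFoldA (nums : List Int) :
    ∀ (n k : Nat) (acc : Int), nums.length ≤ k + n →
    (PySem.List.pyRange (k : Int) (nums.length : Int) 1).foldl
      (fun result i =>
        if PySem.Int.mod i 2 = 1 then result + PySem.List.pyGetD nums i 0
        else result - PySem.List.pyGetD nums i 0) acc
    = acc + pvAltK k (nums.drop k) := by
  intro n
  induction n with
  | zero =>
    intro k acc h
    rw [PySem.List.pyRange_one_eq_nil (by exact_mod_cast (by omega : nums.length ≤ k))]
    rw [List.drop_eq_nil_of_le (by omega)]
    simp [pvAltK]
  | succ n ih =>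
    intro k acc h
    by_cases hk : nums.length ≤ k
    · rw [PySem.List.pyRange_one_eq_nil (by exact_mod_cast hk)]
      rw [List.drop_eq_nil_of_le hk]
      simp [pvAltK]
    · have hk' : k < nums.length := by omega
      rw [PySem.List.pyRange_one_cons (by exact_mod_cast hk')]
      rw [List.foldl_cons]
      have hcast : ((k : Int) + 1) = ((k + 1 : Nat) : Int) := by push_cast; ring
      have hdrop : nums.drop k = nums[k] :: nums.drop (k + 1) := List.drop_eq_getElem_cons hk'
      have hget : PySem.List.pyGetD nums (k : Int) 0 = nums[k] := by
        rw [PySem.List.pyGetD_natCast, List.getD_eq_getElem?_getD,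
          List.getElem?_eq_getElem hk', Option.getD_some]
      by_cases hpar : k % 2 = 1
      · have hc : PySem.Int.mod (k : Int) 2 = 1 := by simp [pysem]; omega
        rw [if_pos hc, hcast, ih (k + 1) _ (by omega), hdrop, pvAltK, if_pos hpar, hget]
        ring
      · have hc : ¬ PySem.Int.mod (k : Int) 2 = 1 := by simp [pysem]; omega
        rw [if_neg hc, hcast, ih (k + 1) _ (by omega), hdrop, pvAltK, if_neg hpar, hget]
        ring

lemma pvRangeEO : ∀ (d : List Int),
    (List.range ((d.length + 1) / 2)).filterMap (fun k => d[2 * k]?) = pvEO d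
  | [] => by simp [pvEO]
  | [x] => by simp [pvEO, List.range_succ]
  | x :: y :: rest => by
    have hlen : ((x :: y :: rest).length + 1) / 2 = (rest.length + 1) / 2 + 1 := by
      simp; omega
    rw [hlen, List.range_succ_eq_map, List.filterMap_cons, List.filterMap_map]
    have : (fun k => (x :: y :: rest)[2 * (k + 1)]?) = (fun k : Nat => rest[2 * k]?) := by
      funext k
      have : 2 * (k + 1) = 2 * k + 2 := by ring
      simp [this]
    simp only [Function.comp_def]
    simp only [show ∀ k : Nat, 2 * (k + 1) = 2 * k + 1 + 1 from fun k => by ring]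
    simp [pvEO, pvRangeEO rest]

lemma pvSliceEO (l : List Int) (s : Nat) :
    PySem.List.slice? l (some (s : Int)) none 2 = some (pvEO (l.drop s)) := by
  by_cases hs : l.length ≤ s
  · rw [List.drop_eq_nil_of_le hs]
    simp only [PySem.List.slice?, PySem.List.sliceIndices]
    norm_num
    have h1 : min (s : Int) (l.length : Int) = (l.length : Int) := by omega
    rw [if_neg (by omega : ¬ (s : Int) < 0), h1]
    simp [pvEO]
  · have hs' : s < l.length := by omega
    simp only [PySem.List.slice?, PySem.List.sliceIndices]
    norm_num
    rw [if_neg (by omega : ¬ (s : Int) < 0)]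
    have h1 : min (s : Int) (l.length : Int) = (s : Int) := by omega
    rw [h1]
    rw [if_pos (by exact_mod_cast hs')]
    have hcount : (((l.length : Int) - (s : Int) + 2 - 1) / 2).toNat
        = ((l.drop s).length + 1) / 2 := by
      rw [List.length_drop]
      omega
    rw [hcount]
    have hget : (fun k : Nat => l[((s : Int) + 2 * (k : Int)).toNat]?)
        = (fun k : Nat => (l.drop s)[2 * k]?) := by
      funext k
      have h2 : ((s : Int) + 2 * (k : Int)).toNat = s + 2 * k := by omega
      rw [h2, List.getElem?_drop]
    rw [hget, pvRangeEO]

-- ===== VERDICT (by name: the statement is the Claim_ definition above) =====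
theorem add_subtract_numbers_spec : Claim_equal_add_subtract_numbers := by
  intro s _ _
  unfold Spec_add_subtract_numbers add_subtract_numbers add_subtract_numbers_alt
  dsimp only
  set nums := (PySem.Str.split₀ s).map (fun num => (PySem.Int.ofStr? num).getD 0) with hn
  have hfold := pvFoldA nums nums.length 1 (PySem.List.pyGetD nums 0 0) (by omega)
  have hs1 := pvSliceEO nums 1
  have hs2 := pvSliceEO nums 2
  rw [Nat.cast_one] at hfold hs1
  rw [Nat.cast_ofNat] at hs2
  rw [hfold, hs1, hs2]
  rw [pvAltK_eo (nums.drop 1) 1 (by omega)]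
  simp only [Option.getD_some]
  have hd : nums.drop 2 = (nums.drop 1).tail := by
    rw [List.tail_drop]
  rw [hd]
  ring
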